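-- pv_equiv track=rewrite | github.com/Shadowz-git/fondamenti1 | eseDomjudge/e3.py | controlloIncrementi
-- ===== SOURCE A (Python) =====
-- def controlloIncrementi(numbers: list):
--     count = 1
--     rapporti = 0
--     for i in range(len(numbers)-1):
--         if (numbers[i] + 1) == numbers[i+1]:
--             count += 1
--             if i == len(numbers) - 2:
--                 rapporti += 1
--         elif (numbers[i] + 1) != numbers[i+1]:
--             if count >= 2:
--                 rapporti += 1
--             count = 1
--
--     return rapporti
-- ===== SOURCE B (Python) =====
-- def controlloIncrementi(numbers: list):
--     flags = [a + 1 == b for a, b in zip(numbers, numbers[1:])]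
--     starts = 0
--     prev = False
--     for f in flags:
--         if f and not prev:
--             starts += 1
--         prev = f
--     return starts
-- ===== Notes on version B (the rewrite author's own statement) =====
-- stated objective: simpler
-- what changed: A keeps a running counter with an end-of-array special case inside one stateful loop; B decomposes the task into two phases: build the boolean step-flag list zip(numbers, numbers[1:]) and then count maximal-run starts (flag true, previous flag false).
import Mathlib
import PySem

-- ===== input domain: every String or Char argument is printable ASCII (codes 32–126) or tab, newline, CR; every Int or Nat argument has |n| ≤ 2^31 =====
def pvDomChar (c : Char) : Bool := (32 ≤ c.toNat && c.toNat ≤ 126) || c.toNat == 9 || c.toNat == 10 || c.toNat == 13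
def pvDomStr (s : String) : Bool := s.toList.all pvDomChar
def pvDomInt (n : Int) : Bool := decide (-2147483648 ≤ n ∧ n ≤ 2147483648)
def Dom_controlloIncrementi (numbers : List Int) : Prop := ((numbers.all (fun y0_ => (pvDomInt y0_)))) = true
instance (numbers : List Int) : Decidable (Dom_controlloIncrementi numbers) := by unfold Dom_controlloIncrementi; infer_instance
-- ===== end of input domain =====

-- B replaces A's running counter with a two-phase decomposition (build step flags, count run starts): simpler, same O(n) cost.


-- ===== PORT A =====
-- loop body of A's 'for i in range(len(numbers)-1)' (state = (count, rapporti))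
def aStep (numbers : List Int) (st : Int × Int) (i : Int) : Int × Int :=
  if PySem.List.pyGetD numbers i 0 + 1 = PySem.List.pyGetD numbers (i + 1) 0 then
    (st.1 + 1, if i = (numbers.length : Int) - 2 then st.2 + 1 else st.2)
  else if PySem.List.pyGetD numbers i 0 + 1 ≠ PySem.List.pyGetD numbers (i + 1) 0 then
    (1, if 2 ≤ st.1 then st.2 + 1 else st.2)
  else st

def controlloIncrementi (numbers : List Int) : Int :=
  ((PySem.List.pyRange 0 ((numbers.length : Int) - 1) 1).foldl (aStep numbers) (1, 0)).2

-- ===== PORT B =====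
-- flags = [a + 1 == b for a, b in zip(numbers, numbers[1:])]
def flagsOf (numbers : List Int) : List Bool :=
  (numbers.zip (PySem.List.slice numbers (some 1) none)).map (fun p => p.1 + 1 == p.2)

-- loop body of B's 'for f in flags' (state = (starts, prev))
def bStep (st : Int × Bool) (f : Bool) : Int × Bool :=
  (if f && !st.2 then st.1 + 1 else st.1, f)

def controlloIncrementi_alt (numbers : List Int) : Int :=
  ((flagsOf numbers).foldl bStep (0, false)).1

-- ===== PRECONDITION & SPEC =====
def Spec_controlloIncrementi (numbers : List Int) (out : Int) : Prop := out = controlloIncrementi_alt numbers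
instance (numbers : List Int) (out : Int) : Decidable (Spec_controlloIncrementi numbers out) := by unfold Spec_controlloIncrementi; infer_instance

-- ===== CLAIM (what is proved, stated in full; the proofs are below) =====
def Claim_equal_controlloIncrementi : Prop := ∀ (numbers : List Int), Dom_controlloIncrementi numbers → Spec_controlloIncrementi numbers (controlloIncrementi numbers)

-- ===== LEMMAS AND PROOFS =====

-- the list of consecutive-increment flags, structurally
def sflags : List Int → List Bool
  | a :: b :: t => (a + 1 == b) :: sflags (b :: t)
  | _ => []

-- A's loop as a structural recursion over the flag list
def aLoop : List Bool → Int → Int → Int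
  | [], _, r => r
  | [true], _, r => r + 1
  | true :: fs, c, r => aLoop fs (c + 1) r
  | false :: fs, c, r => aLoop fs 1 (if 2 ≤ c then r + 1 else r)

lemma sflags_nil_of_short (l : List Int) (h : l.length ≤ 1) : sflags l = [] := by
  match l, h with
  | [], _ => rfl
  | [a], _ => rfl

lemma length_sflags (l : List Int) : (sflags l).length = l.length - 1 := by
  match l with
  | [] => rfl
  | [a] => rfl
  | a :: b :: t =>
    have := length_sflags (b :: t)
    simp [sflags, this]

lemma flagsOf_eq_sflags (numbers : List Int) : flagsOf numbers = sflags numbers := by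
  rw [flagsOf, PySem.List.slice_from_one]
  match numbers with
  | [] => rfl
  | [a] => rfl
  | a :: b :: t =>
    have ih := flagsOf_eq_sflags (b :: t)
    rw [flagsOf, PySem.List.slice_from_one] at ih
    simp only [List.tail_cons, List.zip_cons_cons, List.map_cons, sflags] at ih ⊢
    exact congrArg _ ih

lemma aux (numbers : List Int) (m : Nat) :
    ∀ (k : Nat) (c r : Int), numbers.length - k = m →
    ((PySem.List.pyRange (k : Int) ((numbers.length : Int) - 1) 1).foldl (aStep numbers) (c, r)).2
      = aLoop (sflags (numbers.drop k)) c r := by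
  induction m with
  | zero =>
    intro k c r hm
    rw [PySem.List.pyRange_one_eq_nil (by omega)]
    rw [sflags_nil_of_short _ (by simp; omega)]
    rfl
  | succ m ih =>
    intro k c r hm
    by_cases hlt : k + 1 < numbers.length
    · -- at least one more iteration
      have hk : k < numbers.length := by omega
      rw [PySem.List.pyRange_one_cons (by exact_mod_cast (by omega : (k:Int) < (numbers.length:Int) - 1))]
      rw [List.foldl_cons]
      have hdropk : numbers.drop k = numbers[k] :: numbers.drop (k + 1) :=
        (List.getElem_cons_drop hk).symm
      have hdropk1 : numbers.drop (k + 1) = numbers[k+1] :: numbers.drop (k + 2) :=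
        (List.getElem_cons_drop hlt).symm
      have hget : PySem.List.pyGetD numbers (k : Int) 0 = numbers[k] := by
        simp [PySem.List.pyGetD_natCast, List.getD_eq_getElem?_getD, hk]
      have hget1 : PySem.List.pyGetD numbers ((k : Int) + 1) 0 = numbers[k+1] := by
        have h2 : ((k : Int) + 1) = ((k + 1 : Nat) : Int) := by push_cast; ring
        rw [h2, PySem.List.pyGetD_natCast]
        simp [List.getD_eq_getElem?_getD, hlt]
      rw [aStep, hget, hget1]
      rw [hdropk, hdropk1, sflags]
      by_cases hf : numbers[k] + 1 = numbers[k+1]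
      · simp only [if_pos hf]
        by_cases hlast : k + 2 = numbers.length
        · -- last iteration: the remaining range is empty and the remaining flags are []
          have h1 : (k : Int) = (numbers.length : Int) - 2 := by omega
          rw [if_pos h1]
          rw [PySem.List.pyRange_one_eq_nil (by omega)]
          rw [sflags_nil_of_short _ (by simp; omega)]
          simp [hf, aLoop]
        · have h1 : ¬ ((k : Int) = (numbers.length : Int) - 2) := by omega
          rw [if_neg h1]
          have hfs : sflags (numbers[k+1] :: numbers.drop (k + 2)) ≠ [] := by
            have hlen := length_sflags (numbers[k+1] :: numbers.drop (k + 2))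
            intro hnil
            rw [hnil] at hlen
            simp at hlen
            omega
          have hrec := ih (k + 1) (c + 1) r (by omega)
          rw [hdropk1] at hrec
          have : ((k : Int) + 1) = ((k + 1 : Nat) : Int) := by push_cast; ring
          rw [this, hrec]
          have hbeq : (numbers[k] + 1 == numbers[k+1]) = true := by simp [hf]
          rw [hbeq]
          cases hfs2 : sflags (numbers[k+1] :: numbers.drop (k + 2)) with
          | nil => exact absurd hfs2 hfs
          | cons g gs => cases g <;> rfl
      · simp only [if_neg hf, if_pos (Ne.intro hf)]
        have hrec := ih (k + 1) 1 (if 2 ≤ c then r + 1 else r) (by omega)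
        rw [hdropk1] at hrec
        have : ((k : Int) + 1) = ((k + 1 : Nat) : Int) := by push_cast; ring
        rw [this, hrec]
        have hbeq : (numbers[k] + 1 == numbers[k+1]) = false := by simp [hf]
        rw [hbeq]
        cases hfs2 : sflags (numbers[k+1] :: numbers.drop (k + 2)) with
        | nil => simp [aLoop]
        | cons g gs => rfl
    · -- k + 1 ≥ length: the range is empty (but m = 1 is possible only when k+1 = length)
      rw [PySem.List.pyRange_one_eq_nil (by omega)]
      rw [sflags_nil_of_short _ (by simp; omega)]
      rfl

lemma bridge (fs : List Bool) :
    ∀ (c r s : Int) (p : Bool), 1 ≤ c → (p = true ↔ 2 ≤ c) →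
    s = r + (if p && !fs.isEmpty then 1 else 0) →
    aLoop fs c r = (fs.foldl bStep (s, p)).1 := by
  induction fs with
  | nil =>
    intro c r s p _ _ hs
    simp at hs
    simp [aLoop, hs]
  | cons f rest ih =>
    intro c r s p hc hp hs
    simp only [List.isEmpty_cons, Bool.not_false, Bool.and_true] at hs
    cases rest with
    | nil =>
      cases f
      · show (if 2 ≤ c then r + 1 else r) = (bStep (s, p) false).1
        cases p
        · have hnc : ¬ (2 ≤ c) := fun h => absurd (hp.mpr h) (by decide)
          simp [bStep, hnc, hs]
        · simp [bStep, hs, hp.mp rfl]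
      · show r + 1 = (bStep (s, p) true).1
        cases p
        · simp [bStep, hs]
        · simp [bStep, hs]
    | cons g gs =>
      cases f
      · rw [List.foldl_cons]
        have hb : bStep (s, p) false = (s, false) := by simp [bStep]
        have hr : s = (if 2 ≤ c then r + 1 else r) := by
          cases p
          · have hnc : ¬ (2 ≤ c) := fun h => absurd (hp.mpr h) (by decide)
            simp [hnc, hs]
          · simp [hs, hp.mp rfl]
        rw [hb]
        show aLoop (g :: gs) 1 (if 2 ≤ c then r + 1 else r) = _
        have := ih 1 (if 2 ≤ c then r + 1 else r) s false (by omega) (by simp) (by simp [hr])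
        simpa using this
      · rw [List.foldl_cons]
        cases p
        · have hb : bStep (s, false) true = (s + 1, true) := by simp [bStep]
          rw [hb]
          simp only [Bool.false_eq_true] at hs
          have := ih (c + 1) r (s + 1) true (by omega) ⟨fun _ => by omega, fun _ => rfl⟩
            (by simp [hs])
          simpa using this
        · have hb : bStep (s, true) true = (s, true) := by simp [bStep]
          rw [hb]
          have := ih (c + 1) r s true (by omega) ⟨fun _ => by omega, fun _ => rfl⟩
            (by simp [hs])
          simpa using this

-- ===== VERDICT (by name: the statement is the Claim_ definition above) =====
theorem controlloIncrementi_spec : Claim_equal_controlloIncrementi := by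
  intro numbers _
  show controlloIncrementi numbers = controlloIncrementi_alt numbers
  rw [controlloIncrementi, controlloIncrementi_alt, flagsOf_eq_sflags]
  have h0 := aux numbers (numbers.length - 0) 0 1 0 rfl
  simp only [Nat.cast_zero, List.drop_zero] at h0
  rw [h0]
  exact bridge (sflags numbers) 1 0 0 false (by norm_num) (by simp) (by simp)
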